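-- pv_equiv track=rewrite | github.com/cjuliani/arcgis-landslide-spatial-quantification | scarp_analysis.py | gaps_profiling
-- ===== SOURCE A (Python) =====
-- def gaps_profiling(model, gaps_idx, gaps):
--     # Create profile of gaps (horizontal distance original fault - corrected fault)
--     gaps_idx_ = [i for s in gaps_idx for i in s]
--     gaps_ = [i for s in gaps for i in s]
--
--     new_profile = []
--     cnt = 0
--     for i in range(len(model)):
--         # If the index exist in those of the gaps, add gaps value
--         # otherwise, put null value
--         if i in gaps_idx_:
--             try:
--                 new_profile.append(gaps_[cnt])
--                 cnt = cnt + 1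
--             except:
--                 new_profile.append(0)
--         elif i + len(model) in gaps_idx_:
--             try:
--                 new_profile.append(gaps_[cnt])
--                 cnt = cnt + 1
--             except:
--                 new_profile.append(0)
--         else:
--             new_profile.append(0)
--     #
--     return new_profile
-- ===== SOURCE B (Python) =====
-- def gaps_profiling(model, gaps_idx, gaps):
--     # Index-driven construction: instead of scanning every i in range(len(model))
--     # and testing membership, normalize the gap indices to positions in [0, n),
--     # sort them, and emit the profile as zero-runs between consecutive matched
--     # positions, consuming the flattened gap values from an iterator.
--     n = len(model)
--     pos = {j if j < n else j - n for s in gaps_idx for j in s if 0 <= j < 2 * n}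
--     vals = iter([v for s in gaps for v in s])
--     out = []
--     prev = 0
--     for p in sorted(pos):
--         out.extend([0] * (p - prev))
--         out.append(next(vals, 0))
--         prev = p + 1
--     out.extend([0] * (n - prev))
--     return out
-- ===== Notes on version B (the rewrite author's own statement) =====
-- stated objective: faster
-- what changed: Instead of scanning every index of model and testing it against the flattened gap-index list, B normalizes the gap indices into positions in [0,n), sorts them, and emits the profile as zero-runs between consecutive matched positions while consuming the flattened gap values from an iterator.
import Mathlib
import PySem

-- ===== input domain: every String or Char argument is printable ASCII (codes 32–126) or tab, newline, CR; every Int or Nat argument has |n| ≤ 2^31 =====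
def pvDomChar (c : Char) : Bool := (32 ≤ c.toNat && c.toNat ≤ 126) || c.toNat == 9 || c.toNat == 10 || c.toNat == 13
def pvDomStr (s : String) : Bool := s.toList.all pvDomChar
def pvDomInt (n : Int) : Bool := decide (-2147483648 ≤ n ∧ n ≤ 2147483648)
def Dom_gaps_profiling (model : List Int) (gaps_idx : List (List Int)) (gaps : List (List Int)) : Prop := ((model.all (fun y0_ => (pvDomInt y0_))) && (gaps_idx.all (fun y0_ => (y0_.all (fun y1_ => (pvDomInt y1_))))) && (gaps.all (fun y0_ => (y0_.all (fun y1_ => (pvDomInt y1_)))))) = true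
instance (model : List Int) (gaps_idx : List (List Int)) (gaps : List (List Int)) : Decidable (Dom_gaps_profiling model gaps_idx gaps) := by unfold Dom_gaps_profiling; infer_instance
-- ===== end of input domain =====

-- B replaces A's per-index scan of the flattened gap-index list by: normalize the gap
-- indices to positions in [0, n), sort them, and emit the profile as zero-runs between
-- consecutive matched positions, drawing the gap values from an iterator (objective: faster).

-- ===== PORT A =====
def gaps_profiling (model : List Int) (gaps_idx : List (List Int)) (gaps : List (List Int)) : List Int :=
  let gaps_idx_ : List Int := gaps_idx.flatMap id
  let gaps_ : List Int := gaps.flatMap id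
  -- for i in range(len(model)): append gaps_[cnt] (except -> 0) / 0; cnt counts successes
  let st := (PySem.List.pyRange 0 (model.length : Int) 1).foldl
    (fun (st : List Int × Nat) i =>
      if gaps_idx_.contains i then
        match PySem.List.pyGet? gaps_ (st.2 : Int) with
        | some v => (st.1 ++ [v], st.2 + 1)
        | none => (st.1 ++ [0], st.2)
      else if gaps_idx_.contains (i + (model.length : Int)) then
        match PySem.List.pyGet? gaps_ (st.2 : Int) with
        | some v => (st.1 ++ [v], st.2 + 1)
        | none => (st.1 ++ [0], st.2)
      else (st.1 ++ [0], st.2)) ([], 0)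
  st.1

-- ===== PORT B =====
def gaps_profiling_alt (model : List Int) (gaps_idx : List (List Int)) (gaps : List (List Int)) : List Int :=
  let n : Int := model.length
  -- {j if j < n else j - n for s in gaps_idx for j in s if 0 <= j < 2*n}
  let pos : PySem.Set Int := PySem.Set.ofList ((gaps_idx.flatMap id).filterMap
    (fun j => if 0 ≤ j ∧ j < 2 * n then some (if j < n then j else j - n) else none))
  let vals : List Int := gaps.flatMap id
  -- next(vals_iter, 0): the iterator yields vals in order then the default 0 forever,
  -- so it is exactly vals.getD cnt 0 with cnt advancing once per loop iteration
  let st := (PySem.List.sorted pos (fun x => x) false).foldl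
    (fun (st : List Int × Int × Nat) p =>
      (st.1 ++ List.replicate (p - st.2.1).toNat 0 ++ [vals.getD st.2.2 0], p + 1, st.2.2 + 1))
    ([], 0, 0)
  st.1 ++ List.replicate (n - st.2.1).toNat 0

-- ===== PRECONDITION & SPEC =====
def Spec_gaps_profiling (model : List Int) (gaps_idx : List (List Int)) (gaps : List (List Int)) (out : List Int) : Prop := out = gaps_profiling_alt model gaps_idx gaps
instance (model : List Int) (gaps_idx : List (List Int)) (gaps : List (List Int)) (out : List Int) : Decidable (Spec_gaps_profiling model gaps_idx gaps out) := by unfold Spec_gaps_profiling; infer_instance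

-- ===== CLAIM (what is proved, stated in full; the proofs are below) =====
def Claim_equal_gaps_profiling : Prop := ∀ (model : List Int) (gaps_idx : List (List Int)) (gaps : List (List Int)), Dom_gaps_profiling model gaps_idx gaps → Spec_gaps_profiling model gaps_idx gaps (gaps_profiling model gaps_idx gaps)

-- ===== LEMMAS AND PROOFS =====

-- A's loop body as a structural recursion returning (appended values, final counter).
def pvGo (L : List Int) (q1 q2 : Int → Bool) : List Int → Nat → List Int × Nat
  | [], c => ([], c)
  | i :: t, c =>
    if q1 i then
      match PySem.List.pyGet? L (c : Int) with
      | some v => let r := pvGo L q1 q2 t (c+1); (v :: r.1, r.2)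
      | none => let r := pvGo L q1 q2 t c; (0 :: r.1, r.2)
    else if q2 i then
      match PySem.List.pyGet? L (c : Int) with
      | some v => let r := pvGo L q1 q2 t (c+1); (v :: r.1, r.2)
      | none => let r := pvGo L q1 q2 t c; (0 :: r.1, r.2)
    else let r := pvGo L q1 q2 t c; (0 :: r.1, r.2)

lemma pvGo_foldl (L : List Int) (q1 q2 : Int → Bool) :
    ∀ (l : List Int) (acc : List Int) (c : Nat),
    l.foldl (fun (st : List Int × Nat) i =>
      if q1 i then
        match PySem.List.pyGet? L (st.2 : Int) with
        | some v => (st.1 ++ [v], st.2 + 1)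
        | none => (st.1 ++ [0], st.2)
      else if q2 i then
        match PySem.List.pyGet? L (st.2 : Int) with
        | some v => (st.1 ++ [v], st.2 + 1)
        | none => (st.1 ++ [0], st.2)
      else (st.1 ++ [0], st.2)) (acc, c)
    = (acc ++ (pvGo L q1 q2 l c).1, (pvGo L q1 q2 l c).2) := by
  intro l
  induction l with
  | nil => intro acc c; simp [pvGo]
  | cons i t ih =>
    intro acc c
    simp only [List.foldl_cons, pvGo]
    by_cases h1 : q1 i
    · simp only [h1, if_true]
      cases hg : PySem.List.pyGet? L (c : Int) with
      | some v => rw [ih]; simp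
      | none => rw [ih]; simp
    · simp only [h1]
      by_cases h2 : q2 i
      · simp only [h2, if_true]
        cases hg : PySem.List.pyGet? L (c : Int) with
        | some v => rw [ih]; simp
        | none => rw [ih]; simp
      · simp only [h2, Bool.false_eq_true, if_false]
        rw [ih]; simp

-- The common specification: the profile from position `prev` on, given the sorted
-- list of remaining matched positions and the value counter.
def pvSeg (vals : List Int) (n : Int) : List Int → Int → Nat → List Int
  | [], prev, _ => List.replicate (n - prev).toNat 0
  | p :: t, prev, c =>
    List.replicate (p - prev).toNat 0 ++ vals.getD c 0 :: pvSeg vals n t (p+1) (c+1)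

lemma pvSeg_shift (vals : List Int) (n : Int) (L : List Int) (prev : Int) (c : Nat)
    (hn : prev < n) (hL : ∀ x ∈ L, prev < x) :
    pvSeg vals n L prev c = 0 :: pvSeg vals n L (prev+1) c := by
  cases L with
  | nil =>
    simp only [pvSeg]
    rw [show (n - prev).toNat = (n - (prev+1)).toNat + 1 by omega, List.replicate_succ]
  | cons p t =>
    have hp : prev < p := hL p (by simp)
    simp only [pvSeg]
    rw [show (p - prev).toNat = (p - (prev+1)).toNat + 1 by omega, List.replicate_succ]
    simp

lemma pvGo_eq_pvSeg (vals : List Int) (q1 q2 : Int → Bool) (n : Int) :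
    ∀ (k : Nat) (prev : Int) (c : Nat), (n - prev).toNat = k →
    (pvGo vals q1 q2 (PySem.List.pyRange prev n 1) (min c vals.length)).1
      = pvSeg vals n ((PySem.List.pyRange prev n 1).filter (fun i => q1 i || q2 i)) prev c := by
  intro k
  induction k with
  | zero =>
    intro prev c hk
    rw [PySem.List.pyRange_one_eq_nil (by omega)]
    simp only [List.filter_nil, pvGo, pvSeg]
    rw [show (n - prev).toNat = 0 from hk]
    simp
  | succ k ih =>
    intro prev c hk
    have hlt : prev < n := by omega
    rw [PySem.List.pyRange_one_cons hlt]
    by_cases hp : (q1 prev || q2 prev) = true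
    · -- matched position: one value is consumed (or 0 once the values are exhausted)
      have hfilter : (prev :: PySem.List.pyRange (prev+1) n 1).filter (fun i => q1 i || q2 i)
          = prev :: (PySem.List.pyRange (prev+1) n 1).filter (fun i => q1 i || q2 i) :=
        List.filter_cons_of_pos hp
      rw [hfilter]
      have hval :
          (pvGo vals q1 q2 (prev :: PySem.List.pyRange (prev+1) n 1) (min c vals.length)).1
            = vals.getD c 0 ::
              (pvGo vals q1 q2 (PySem.List.pyRange (prev+1) n 1) (min (c+1) vals.length)).1 := by
        by_cases hc : c < vals.length
        · have hmin : min c vals.length = c := by omega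
          have hmin' : min (c+1) vals.length = c + 1 := by omega
          have hget : PySem.List.pyGet? vals ((c : Nat) : Int) = some vals[c] := by
            rw [PySem.List.pyGet?_natCast, List.getElem?_eq_getElem hc]
          have hgetD : vals.getD c 0 = vals[c] := List.getD_eq_getElem _ _ hc
          rcases Bool.or_eq_true_iff.mp hp with h1 | h2
          · simp [pvGo, h1, hmin, hmin', hget, List.getElem?_eq_getElem hc]
          · by_cases h1 : q1 prev <;>
              simp [pvGo, h1, h2, hmin, hmin', hget, List.getElem?_eq_getElem hc]
        · have hmin : min c vals.length = vals.length := by omega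
          have hmin' : min (c+1) vals.length = vals.length := by omega
          have hget : PySem.List.pyGet? vals ((vals.length : Nat) : Int) = none := by
            rw [PySem.List.pyGet?_natCast, List.getElem?_eq_none (by omega)]
          have hgetD : vals.getD c 0 = 0 := List.getD_eq_default _ _ (by omega)
          have hnone : vals[c]? = none := List.getElem?_eq_none (by omega)
          rcases Bool.or_eq_true_iff.mp hp with h1 | h2
          · simp [pvGo, h1, hmin, hmin', hget, hnone]
          · by_cases h1 : q1 prev <;> simp [pvGo, h1, h2, hmin, hmin', hget, hnone]
      rw [hval]
      rw [ih (prev+1) (c+1) (by omega)]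
      simp [pvSeg]
    · -- unmatched position: a zero, counter unchanged
      have h1 : q1 prev = false := by
        cases h : q1 prev
        · rfl
        · exact absurd (by simp [h]) hp
      have h2 : q2 prev = false := by
        cases h : q2 prev
        · rfl
        · exact absurd (by simp [h]) hp
      have hfilter : (prev :: PySem.List.pyRange (prev+1) n 1).filter (fun i => q1 i || q2 i)
          = (PySem.List.pyRange (prev+1) n 1).filter (fun i => q1 i || q2 i) :=
        List.filter_cons_of_neg (by simp [h1, h2])
      rw [hfilter]
      have : (pvGo vals q1 q2 (prev :: PySem.List.pyRange (prev+1) n 1) (min c vals.length)).1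
          = 0 :: (pvGo vals q1 q2 (PySem.List.pyRange (prev+1) n 1) (min c vals.length)).1 := by
        simp [pvGo, h1, h2]
      rw [this, ih (prev+1) c (by omega)]
      rw [pvSeg_shift vals n _ prev c hlt]
      intro x hx
      have := List.mem_filter.mp hx
      have := (PySem.List.mem_pyRange_one).mp this.1
      omega

-- B's emission loop, with its step function named, computes pvSeg in accumulator form.
def pvStepB (vals : List Int) (st : List Int × Int × Nat) (p : Int) : List Int × Int × Nat :=
  (st.1 ++ List.replicate (p - st.2.1).toNat 0 ++ [vals.getD st.2.2 0], p + 1, st.2.2 + 1)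

lemma pvFold_eq_pvSeg (vals : List Int) (n : Int) :
    ∀ (L out : List Int) (prev : Int) (c : Nat),
    (L.foldl (pvStepB vals) (out, prev, c)).1
    ++ List.replicate (n - (L.foldl (pvStepB vals) (out, prev, c)).2.1).toNat 0
    = out ++ pvSeg vals n L prev c := by
  intro L
  induction L with
  | nil => intro out prev c; simp [pvSeg]
  | cons p t ih =>
    intro out prev c
    simp only [List.foldl_cons, pvStepB]
    rw [ih]
    simp [pvSeg, List.append_assoc]

-- The sorted set of normalized positions IS the filtered range A implicitly walks.
lemma pvSorted_eq (flat : List Int) (n : Int) :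
    PySem.List.sorted (PySem.Set.ofList (flat.filterMap
        (fun j => if 0 ≤ j ∧ j < 2 * n then some (if j < n then j else j - n) else none)))
      (fun x => x) false
    = (PySem.List.pyRange 0 n 1).filter (fun i => flat.contains i || flat.contains (i + n)) := by
  apply PySem.List.sorted_eq_of_perm_of_pairwise_lt
  · rw [List.perm_ext_iff_of_nodup
      ((PySem.List.nodup_pyRange_one 0 n).filter _) (PySem.Set.nodup_ofList _)]
    intro x
    simp only [List.mem_filter, PySem.Set.mem_ofList, List.mem_filterMap,
      PySem.List.mem_pyRange_one, Bool.or_eq_true, List.contains_iff_mem]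
    constructor
    · rintro ⟨⟨hx0, hxn⟩, h | h⟩
      · exact ⟨x, h, by rw [if_pos (by omega), if_pos (by omega)]⟩
      · refine ⟨x + n, h, ?_⟩
        rw [if_pos (by omega), if_neg (by omega)]
        congr 1
        omega
    · rintro ⟨j, hj, hf⟩
      split_ifs at hf with hb hlt
      · obtain rfl : j = x := by simpa using hf
        exact ⟨⟨by omega, by omega⟩, Or.inl hj⟩
      · obtain rfl : j - n = x := by simpa using hf
        refine ⟨⟨by omega, by omega⟩, Or.inr ?_⟩
        have : j - n + n = j := by omega
        rwa [this]
  · exact (PySem.List.pairwise_lt_pyRange_one 0 n).filter _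

-- ===== VERDICT (by name: the statement is the Claim_ definition above) =====
theorem gaps_profiling_spec : Claim_equal_gaps_profiling := by
  intro model gaps_idx gaps _
  unfold Spec_gaps_profiling gaps_profiling gaps_profiling_alt
  show ((PySem.List.pyRange 0 (model.length : Int) 1).foldl
      (fun (st : List Int × Nat) i =>
        if (gaps_idx.flatMap id).contains i then
          match PySem.List.pyGet? (gaps.flatMap id) (st.2 : Int) with
          | some v => (st.1 ++ [v], st.2 + 1)
          | none => (st.1 ++ [0], st.2)
        else if (gaps_idx.flatMap id).contains (i + (model.length : Int)) then
          match PySem.List.pyGet? (gaps.flatMap id) (st.2 : Int) with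
          | some v => (st.1 ++ [v], st.2 + 1)
          | none => (st.1 ++ [0], st.2)
        else (st.1 ++ [0], st.2)) ([], 0)).1
    = ((PySem.List.sorted (PySem.Set.ofList ((gaps_idx.flatMap id).filterMap
          (fun j => if 0 ≤ j ∧ j < 2 * (model.length : Int) then
            some (if j < (model.length : Int) then j else j - (model.length : Int)) else none)))
        (fun x => x) false).foldl
        (fun (st : List Int × Int × Nat) p =>
          (st.1 ++ List.replicate (p - st.2.1).toNat 0 ++ [(gaps.flatMap id).getD st.2.2 0],
            p + 1, st.2.2 + 1)) ([], 0, 0)).1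
      ++ List.replicate ((model.length : Int)
          - ((PySem.List.sorted (PySem.Set.ofList ((gaps_idx.flatMap id).filterMap
              (fun j => if 0 ≤ j ∧ j < 2 * (model.length : Int) then
                some (if j < (model.length : Int) then j else j - (model.length : Int)) else none)))
            (fun x => x) false).foldl
            (fun (st : List Int × Int × Nat) p =>
              (st.1 ++ List.replicate (p - st.2.1).toNat 0 ++ [(gaps.flatMap id).getD st.2.2 0],
                p + 1, st.2.2 + 1)) ([], 0, 0)).2.1).toNat 0
  rw [pvGo_foldl (gaps.flatMap id) (fun i => (gaps_idx.flatMap id).contains i)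
        (fun i => (gaps_idx.flatMap id).contains (i + (model.length : Int)))]
  rw [show (fun (st : List Int × Int × Nat) p =>
        (st.1 ++ List.replicate (p - st.2.1).toNat 0 ++ [(gaps.flatMap id).getD st.2.2 0],
          p + 1, st.2.2 + 1)) = pvStepB (gaps.flatMap id) from rfl]
  rw [pvSorted_eq (gaps_idx.flatMap id) (model.length : Int)]
  rw [pvFold_eq_pvSeg (gaps.flatMap id) (model.length : Int)]
  simp only [List.nil_append]
  have h := pvGo_eq_pvSeg (gaps.flatMap id) (fun i => (gaps_idx.flatMap id).contains i)
      (fun i => (gaps_idx.flatMap id).contains (i + (model.length : Int)))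
      (model.length : Int) ((model.length : Int) - 0).toNat 0 0 rfl
  simpa using h
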